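-- pv_equiv track=rewrite | github.com/lbvalcke/Classwork | lbvalcke-master-122/lbvalcke-master-a3fa9d442dc280c08a0ff3fd54751bb1bdff6871/bac-exam2/bac.py | mystery1
-- ===== SOURCE A (Python) =====
-- def mystery1(s, c, d, x):
--     if s == "":
--         return x
--     elif s[0] == c:
--         return mystery1(s[1:], c, d, x+1)
--     elif s[0] == d:
--         if x > 0:
--             return mystery1(s[1:], c, d, x-1)
--         return -1
--     else:
--         return mystery1(s[1:], c, d, x)
-- ===== SOURCE B (Python) =====
-- def mystery1(s, c, d, x):
--     for ch in s:
--         if ch == c: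
--             x += 1
--         elif ch == d:
--             if x <= 0:
--                 return -1
--             x -= 1
--     return x
-- ===== Notes on version B (the rewrite author's own statement) =====
-- stated objective: faster
-- what changed: Replaced the recursion that rebuilds the tail string s[1:] at every step with a single iterative pass over the characters using a running counter and early -1 return.
import Mathlib
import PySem

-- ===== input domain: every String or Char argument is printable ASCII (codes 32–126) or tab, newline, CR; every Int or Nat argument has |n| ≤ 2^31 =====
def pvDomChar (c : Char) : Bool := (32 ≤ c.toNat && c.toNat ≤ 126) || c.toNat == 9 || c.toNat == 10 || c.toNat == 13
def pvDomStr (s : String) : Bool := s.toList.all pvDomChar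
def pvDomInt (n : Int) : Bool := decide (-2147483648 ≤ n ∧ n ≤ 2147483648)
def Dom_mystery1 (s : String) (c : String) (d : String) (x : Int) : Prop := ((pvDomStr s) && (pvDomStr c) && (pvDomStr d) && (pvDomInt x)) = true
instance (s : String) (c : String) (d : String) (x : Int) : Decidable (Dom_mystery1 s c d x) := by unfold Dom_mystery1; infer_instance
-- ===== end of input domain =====

-- ===== PORT A =====
-- B replaces A's tail-slicing recursion with one linear pass; equal return value on all inputs.
-- literal port of A: recursion on the character list (s[1:] = the tail), branches in A's order
def mystery1Go (c : String) (d : String) : List Char → Int → Int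
  | [], x => x
  | h :: t, x =>
    if String.mk [h] = c then mystery1Go c d t (x + 1)
    else if String.mk [h] = d then
      (if x > 0 then mystery1Go c d t (x - 1) else -1)
    else mystery1Go c d t x

def mystery1 (s : String) (c : String) (d : String) (x : Int) : Int :=
  mystery1Go c d s.toList x

-- ===== PORT B =====
-- literal port of B: a fold over the characters; `none` = the early `return -1`
def mystery1Step (c : String) (d : String) (acc : Option Int) (ch : Char) : Option Int :=
  match acc with
  | none => none
  | some x =>
    if String.mk [ch] = c then some (x + 1)
    else if String.mk [ch] = d then
      (if x ≤ 0 then none else some (x - 1))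
    else some x

def mystery1_alt (s : String) (c : String) (d : String) (x : Int) : Int :=
  match s.toList.foldl (mystery1Step c d) (some x) with
  | some v => v
  | none => -1
-- ===== PRECONDITION & SPEC =====
def Spec_mystery1 (s : String) (c : String) (d : String) (x : Int) (out : Int) : Prop := out = mystery1_alt s c d x
instance (s : String) (c : String) (d : String) (x : Int) (out : Int) : Decidable (Spec_mystery1 s c d x out) := by unfold Spec_mystery1; infer_instance

-- ===== CLAIM (what is proved, stated in full; the proofs are below) =====
def Claim_equal_mystery1 : Prop := ∀ (s : String) (c : String) (d : String) (x : Int), Dom_mystery1 s c d x → Spec_mystery1 s c d x (mystery1 s c d x)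

-- ===== LEMMAS AND PROOFS =====
theorem foldl_step_none (c d : String) (l : List Char) :
    l.foldl (mystery1Step c d) none = none := by
  induction l with
  | nil => rfl
  | cons h t ih => simpa [mystery1Step] using ih

theorem go_eq_fold (c d : String) (l : List Char) (x : Int) :
    mystery1Go c d l x =
      (match l.foldl (mystery1Step c d) (some x) with
       | some v => v
       | none => -1) := by
  induction l generalizing x with
  | nil => rfl
  | cons h t ih =>
    simp only [mystery1Go, mystery1Step, List.foldl_cons]
    by_cases h1 : String.mk [h] = c
    · simp only [if_pos h1]; exact ih (x + 1)
    · by_cases h2 : String.mk [h] = d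
      · by_cases h3 : x > 0
        · have h4 : ¬ x ≤ 0 := by omega
          simp only [if_neg h1, if_pos h2, if_pos h3, if_neg h4]; exact ih (x - 1)
        · have h4 : x ≤ 0 := by omega
          simp only [if_neg h1, if_pos h2, if_neg h3, if_pos h4, foldl_step_none]
      · simp only [if_neg h1, if_neg h2]; exact ih x

-- ===== VERDICT (by name: the statement is the Claim_ definition above) =====
theorem mystery1_spec : Claim_equal_mystery1 := by
  intro s c d x _
  unfold Spec_mystery1 mystery1 mystery1_alt
  exact go_eq_fold c d s.toList x
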